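-- pv_equiv track=rewrite | github.com/artempenteskul/py | python-exercise-stivenson/arrays/only_words.py | only_words
-- ===== SOURCE A (Python) =====
-- def only_words(line: str):
--     symbols_to_exclude = ['.', ',', ':', '!', '?']
--     line_without_symbols = ''
--     for symbol in line:
--         if symbol not in symbols_to_exclude:
--             line_without_symbols += symbol
--     words = line_without_symbols.split()
--     return words
-- ===== SOURCE B (Python) =====
-- def only_words(line: str):
--     words = []
--     current = []
--     for ch in line:
--         if ch in '.,:!?':
--             continue
--         if ch.isspace():
--             if current:
--                 words.append(''.join(current))
--                 current = []
--         else: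
--             current.append(ch)
--     if current:
--         words.append(''.join(current))
--     return words
-- ===== Notes on version B (the rewrite author's own statement) =====
-- stated objective: alternative
-- what changed: B is a single-pass tokenizer (state machine over characters that skips punctuation, accumulates word characters and flushes the current word at whitespace), instead of A's two staged passes: build a punctuation-free copy of the whole line, then split() it.
import Mathlib
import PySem

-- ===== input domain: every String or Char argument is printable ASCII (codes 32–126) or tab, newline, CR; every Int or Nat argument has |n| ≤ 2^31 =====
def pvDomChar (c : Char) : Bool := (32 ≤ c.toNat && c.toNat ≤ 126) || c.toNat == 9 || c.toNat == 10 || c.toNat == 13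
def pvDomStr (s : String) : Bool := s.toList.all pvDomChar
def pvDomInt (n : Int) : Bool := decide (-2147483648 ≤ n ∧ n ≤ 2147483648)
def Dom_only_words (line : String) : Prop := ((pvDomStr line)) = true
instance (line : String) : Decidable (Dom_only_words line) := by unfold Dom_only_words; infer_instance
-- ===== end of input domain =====

-- B replaces A's two staged passes (build a punctuation-free copy of the line, then split it)
-- by a single-pass tokenizer: one scan over the characters that skips punctuation, accumulates
-- word characters and flushes the current word at whitespace.

-- ===== PORT A =====
-- A: build a copy of the line without the 5 punctuation characters, then .split() it.
def only_words (line : String) : List String :=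
  let symbols_to_exclude : List Char := ['.', ',', ':', '!', '?']
  let line_without_symbols : List Char :=
    line.toList.foldl (fun acc c => if !(c ∈ symbols_to_exclude) then acc ++ [c] else acc) []
  PySem.Str.split₀ (String.ofList line_without_symbols)

-- ===== PORT B =====
-- B: single scan; `cur` is the word being built, `words` the words emitted so far;
-- punctuation is skipped, whitespace flushes `cur`, other characters extend it;
-- the nil case is Python's post-loop flush of the last word.
def owScan : List Char → List Char → List String → List String
  | [], cur, words =>
      if cur.isEmpty then words else words ++ [String.ofList cur]
  | ch :: rest, cur, words =>
      if ch ∈ (['.', ',', ':', '!', '?'] : List Char) then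
        owScan rest cur words
      else if PySem.Chars.isspace ch then
        if cur.isEmpty then owScan rest cur words
        else owScan rest [] (words ++ [String.ofList cur])
      else
        owScan rest (cur ++ [ch]) words

def only_words_alt (line : String) : List String :=
  owScan line.toList [] []

-- ===== PRECONDITION & SPEC =====
def Spec_only_words (line : String) (out : List String) : Prop := out = only_words_alt line
instance (line : String) (out : List String) : Decidable (Spec_only_words line out) := by
  unfold Spec_only_words; infer_instance

-- ===== CLAIM =====
def Claim_equal_only_words : Prop := ∀ (line : String), Dom_only_words line → Spec_only_words line (only_words line)

-- ===== LEMMAS AND PROOFS =====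
def pvKeep (c : Char) : Bool := !(c ∈ (['.', ',', ':', '!', '?'] : List Char))

theorem pvFoldl_filter (cs : List Char) (acc : List Char) :
    cs.foldl (fun acc c => if !(c ∈ (['.', ',', ':', '!', '?'] : List Char)) then acc ++ [c] else acc) acc
      = acc ++ cs.filter pvKeep := by
  induction cs generalizing acc with
  | nil => simp
  | cons c rest ih =>
    rw [List.foldl_cons, List.filter_cons, ih]
    by_cases h : (c ∈ (['.', ',', ':', '!', '?'] : List Char))
    · rw [if_neg (by simp [h]), if_neg (by simp [pvKeep, h])]
    · rw [if_pos (by simp [h]), if_pos (by simp [pvKeep, h])]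
      simp

theorem pvGo_acc (cs : List Char) (cur : List Char) (acc : List (List Char)) :
    PySem.Chars.split₀.go cs cur acc = acc.reverse ++ PySem.Chars.split₀.go cs cur [] := by
  induction cs generalizing cur acc with
  | nil =>
    simp only [PySem.Chars.split₀.go]
    by_cases h : cur.isEmpty <;> simp [h]
  | cons c rest ih =>
    simp only [PySem.Chars.split₀.go]
    by_cases hs : PySem.Chars.isspace c
    · by_cases h : cur.isEmpty
      · simp only [hs, h, if_true]
        exact ih [] acc
      · simp only [hs, h, if_true, Bool.false_eq_true, if_false]
        rw [ih [] (cur.reverse :: acc), ih [] [cur.reverse]]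
        simp
    · simp only [hs, Bool.false_eq_true, if_false]
      exact ih (c :: cur) acc

-- B's scan computes exactly split₀ of the punctuation-filtered characters.
theorem pvScan_eq (cs : List Char) (cur : List Char) (words : List String) :
    owScan cs cur words
      = words ++ (PySem.Chars.split₀.go (cs.filter pvKeep) cur.reverse []).map String.ofList := by
  induction cs generalizing cur words with
  | nil =>
    simp only [List.filter_nil, owScan, PySem.Chars.split₀.go]
    by_cases h : cur.isEmpty
    · have : cur = [] := by cases cur <;> simp_all
      subst this; simp
    · rw [if_neg h, if_neg (by simpa using h)]
      simp
  | cons c rest ih =>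
    by_cases hp : c ∈ (['.', ',', ':', '!', '?'] : List Char)
    · rw [List.filter_cons_of_neg (by simp [pvKeep, hp])]
      simp only [owScan, if_pos hp]
      exact ih cur words
    · rw [List.filter_cons_of_pos (by simp [pvKeep, hp])]
      simp only [owScan, if_neg hp]
      by_cases hs : PySem.Chars.isspace c
      · simp only [hs, if_true, PySem.Chars.split₀.go]
        by_cases h : cur.isEmpty
        · have : cur = [] := by cases cur <;> simp_all
          subst this
          simp only [h, if_pos, List.reverse_nil]
          exact ih [] words
        · rw [if_neg h, if_neg (by simpa using h)]
          rw [pvGo_acc (rest.filter pvKeep) [] [cur.reverse.reverse]]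
          rw [ih [] (words ++ [String.ofList cur])]
          simp
      · simp only [hs, Bool.false_eq_true, if_false, PySem.Chars.split₀.go]
        rw [ih (cur ++ [c]) words]
        simp

theorem pvA_eq (line : String) :
    only_words line = (PySem.Chars.split₀ (line.toList.filter pvKeep)).map String.ofList := by
  unfold only_words
  show PySem.Str.split₀ (String.ofList (line.toList.foldl
      (fun acc c => if !(c ∈ (['.', ',', ':', '!', '?'] : List Char)) then acc ++ [c] else acc) [])) = _
  rw [pvFoldl_filter, List.nil_append]
  unfold PySem.Str.split₀
  rw [show (String.ofList (line.toList.filter pvKeep)).toList = line.toList.filter pvKeep by simp]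

-- ===== VERDICT =====
theorem only_words_spec : Claim_equal_only_words := by
  intro line _
  unfold Spec_only_words only_words_alt
  rw [pvA_eq, pvScan_eq]
  simp [PySem.Chars.split₀]
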